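-- pv_equiv track=rewrite | github.com/oviazlo/SelfSTUDY | Python/AdventOfCode2021/Day23/a_star_search_algorithm.py | parse_coord_map
-- ===== SOURCE A (Python) =====
-- amphipods = ["A", "B", "C", "D"]
--
-- HEIGHT = 4
--
-- def parse_coord_map(str_coord_map):
--     # tmp_str_list = ["#AA.D.B.B.BD#", "###B#.#.#.###", "#D#.#C#.#", "#D#.#C#C#", "#A#.#C#A#"]
--     out_coords = []
--     for i_am in amphipods:
--         for i in range(HEIGHT+1):
--             line = str_coord_map[i]
--             counter = 2
--             first_symbol_found = False
--             if i==0: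
--                 counter = 0
--             for i_char in list(line):
--                 if i_char != "#" and not first_symbol_found:
--                     first_symbol_found = True
--                 if first_symbol_found:
--                    if i_char == i_am:
--                        out_coords.append((counter, HEIGHT-i))
--                    counter += 1
--     return out_coords
-- ===== SOURCE B (Python) =====
-- HEIGHT = 4
--
-- def parse_coord_map(str_coord_map):
--     # Parse the 5 lines once into (char, coord) pairs via index arithmetic
--     # (coordinate = base + offset from the first non-'#' char), then select
--     # per amphipod type by filtering the parsed pairs.
--     pairs = []
--     for i in range(HEIGHT + 1):
--         base = 0 if i == 0 else 2
--         body = str_coord_map[i]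
--         while body.startswith('#'):
--             body = body[1:]
--         for k, ch in enumerate(body):
--             pairs.append((ch, (base + k, HEIGHT - i)))
--     return ([xy for ch, xy in pairs if ch == 'A']
--             + [xy for ch, xy in pairs if ch == 'B']
--             + [xy for ch, xy in pairs if ch == 'C']
--             + [xy for ch, xy in pairs if ch == 'D'])
-- ===== Notes on version B (the rewrite author's own statement) =====
-- stated objective: alternative
-- what changed: B replaces A's per-amphipod rescans driven by a counter/first-symbol state machine with a single parse pass that computes each coordinate by index arithmetic from the first non-'#' position (enumerate over the stripped line) into a (char, coord) pair list, then builds the result by four filters over that parsed list.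
import Mathlib
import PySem

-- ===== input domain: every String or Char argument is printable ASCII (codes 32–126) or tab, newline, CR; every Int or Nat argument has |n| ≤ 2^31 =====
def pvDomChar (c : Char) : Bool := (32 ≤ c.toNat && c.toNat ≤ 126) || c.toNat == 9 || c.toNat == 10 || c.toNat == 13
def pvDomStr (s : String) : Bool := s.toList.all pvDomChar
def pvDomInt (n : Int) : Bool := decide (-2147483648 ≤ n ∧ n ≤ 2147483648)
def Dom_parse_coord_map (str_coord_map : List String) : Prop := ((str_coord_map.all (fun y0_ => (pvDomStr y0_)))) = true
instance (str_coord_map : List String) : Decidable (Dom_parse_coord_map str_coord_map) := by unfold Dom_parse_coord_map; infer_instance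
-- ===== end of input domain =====

-- B parses the lines once into (char, coord) pairs by index arithmetic and filters per type,
-- instead of A's per-amphipod rescan with a counter/first-symbol state machine (alternative, same cost).

-- ===== PORT A =====
-- inner character loop of A for one amphipod i_am on one line: state (counter, first_symbol_found, out)
def pvAline (i_am : Char) (i : Int) : List Char → Int → Bool → List (Int × Int) → List (Int × Int)
  | [], _, _, out => out
  | c :: cs, counter, found, out =>
    let found := if c ≠ '#' ∧ found = false then true else found
    if found then
      let out := if c = i_am then out ++ [(counter, 4 - i)] else out
      pvAline i_am i cs (counter + 1) found out
    else
      pvAline i_am i cs counter found out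

def parse_coord_map (str_coord_map : List String) : List (Int × Int) :=
  ['A', 'B', 'C', 'D'].foldl (fun out i_am =>
    (PySem.List.pyRange 0 (4 + 1) 1).foldl (fun out i =>
      let line := ((PySem.List.pyGet? str_coord_map i).getD "").toList
      let counter : Int := if i = 0 then 0 else 2
      pvAline i_am i line counter false out) out) []

-- ===== PORT B =====
-- the `while body.startswith('#'): body = body[1:]` loop of Source B
def pvLstripHash : List Char → List Char
  | [] => []
  | c :: cs => if c == '#' then pvLstripHash cs else c :: cs

-- the `for k, ch in enumerate(body): pairs.append((ch, (base + k, HEIGHT - i)))` loop of Source B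
def pvLinePairs (base i : Int) (body : List Char) : List (Char × (Int × Int)) :=
  (PySem.List.enumerate body 0).map (fun kc => (kc.2, (base + kc.1, 4 - i)))

def parse_coord_map_alt (str_coord_map : List String) : List (Int × Int) :=
  let pairs := (PySem.List.pyRange 0 (4 + 1) 1).foldl (fun pairs i =>
    let base : Int := if i = 0 then 0 else 2
    let body := pvLstripHash ((PySem.List.pyGet? str_coord_map i).getD "").toList
    pairs ++ pvLinePairs base i body) []
  (pairs.filter (fun p => p.1 == 'A')).map Prod.snd
    ++ (pairs.filter (fun p => p.1 == 'B')).map Prod.snd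
    ++ (pairs.filter (fun p => p.1 == 'C')).map Prod.snd
    ++ (pairs.filter (fun p => p.1 == 'D')).map Prod.snd

-- ===== PRECONDITION & SPEC =====
-- Pre_ excludes inputs with fewer than 5 lines, on which A raises IndexError (str_coord_map[i], i in range(5)).
def Pre_parse_coord_map (str_coord_map : List String) : Prop := 5 ≤ str_coord_map.length
instance (str_coord_map : List String) : Decidable (Pre_parse_coord_map str_coord_map) := by unfold Pre_parse_coord_map; infer_instance
def pvWitness_parse_coord_map : List String :=
  ["#AA.D.B.B.BD#", "###B#.#.#.###", "#D#.#C#.#", "#D#.#C#C#", "#A#.#C#A#"]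

def Spec_parse_coord_map (str_coord_map : List String) (out : List (Int × Int)) : Prop := out = parse_coord_map_alt str_coord_map
instance (str_coord_map : List String) (out : List (Int × Int)) : Decidable (Spec_parse_coord_map str_coord_map out) := by unfold Spec_parse_coord_map; infer_instance

-- ===== CLAIM =====
def Claim_equal_parse_coord_map : Prop := ∀ (str_coord_map : List String), Dom_parse_coord_map str_coord_map → Pre_parse_coord_map str_coord_map → Spec_parse_coord_map str_coord_map (parse_coord_map str_coord_map)

-- ===== LEMMAS AND PROOFS =====

-- A's accumulator factors out
theorem pvAline_out (i_am : Char) (i : Int) (cs : List Char) :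
    ∀ counter found out, pvAline i_am i cs counter found out = out ++ pvAline i_am i cs counter found [] := by
  induction cs with
  | nil => intro counter found out; simp [pvAline]
  | cons c cs ih =>
    intro counter found out
    simp only [pvAline]
    split_ifs <;>
      first
        | exact ih _ _ out
        | (rw [ih _ _ (out ++ [(counter, 4 - i)]), ih _ _ ([] ++ [(counter, 4 - i)])]; simp)

-- emission list of one line body starting at coordinate b, row j (proof-side characterization)
def pvEmit (b j : Int) : List Char → List (Char × (Int × Int))
  | [] => []
  | c :: cs => (c, (b, j)) :: pvEmit (b + 1) j cs

-- B's enumerate/map per-line loop computes pvEmit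
theorem pvLinePairs_eq_emit (cs : List Char) :
    ∀ (base s i : Int),
      (PySem.List.enumerate cs s).map (fun kc => (kc.2, (base + kc.1, 4 - i))) = pvEmit (base + s) (4 - i) cs := by
  induction cs with
  | nil => intro base s i; simp [PySem.List.enumerate_nil, pvEmit]
  | cons c cs ih =>
    intro base s i
    rw [PySem.List.enumerate_cons]
    simp only [List.map_cons, pvEmit]
    rw [ih base (s + 1) i]
    ring_nf

-- A's found=true phase emits exactly the k-filtered pvEmit
theorem pvAline_true (k : Char) (i : Int) (cs : List Char) :
    ∀ counter, pvAline k i cs counter true [] = ((pvEmit counter (4 - i) cs).filter (fun p => p.1 == k)).map Prod.snd := by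
  induction cs with
  | nil => intro counter; simp [pvAline, pvEmit]
  | cons c cs ih =>
    intro counter
    have hupd : (if c ≠ '#' ∧ (true : Bool) = false then true else true) = true := by simp
    simp only [pvAline, hupd, pvEmit, List.filter_cons]
    rw [if_pos trivial]
    by_cases hc : c = k
    · subst hc
      rw [if_pos rfl, pvAline_out c i cs (counter + 1) true ([] ++ [(counter, 4 - i)]), ih (counter + 1)]
      simp
    · rw [if_neg hc, ih (counter + 1)]
      have hb : ((c, (counter, 4 - i)).1 == k) = false := by simp [hc]
      simp [hb]

-- A's found=false phase skips leading '#' without touching the counter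
theorem pvAline_false (k : Char) (i : Int) (cs : List Char) :
    ∀ counter out, pvAline k i cs counter false out = pvAline k i (pvLstripHash cs) counter true out := by
  induction cs with
  | nil => intro counter out; simp [pvAline, pvLstripHash]
  | cons c cs ih =>
    intro counter out
    by_cases hc : c = '#'
    · subst hc
      simp only [pvLstripHash, beq_self_eq_true, if_true]
      simp only [pvAline, ne_eq, not_true_eq_false, false_and, if_false]
      exact ih counter out
    · simp only [pvLstripHash, beq_iff_eq, hc, if_false]
      simp only [pvAline, ne_eq, hc, not_false_eq_true, true_and, if_true]
      simp

-- a fold that appends per-element segments is a flatMap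
theorem pvAfold_flat (k : Char) (line : Int → List Char) (cnt : Int → Int) (is : List Int) :
    ∀ out, is.foldl (fun out i => pvAline k i (line i) (cnt i) false out) out =
      out ++ is.flatMap (fun i => pvAline k i (line i) (cnt i) false []) := by
  induction is with
  | nil => intro out; simp
  | cons i is ih =>
    intro out
    simp only [List.foldl_cons, List.flatMap_cons]
    rw [ih, pvAline_out k i (line i) (cnt i) false out]
    simp

theorem pvBfold_flat (g : Int → List (Char × (Int × Int))) (is : List Int) :
    ∀ acc, is.foldl (fun pairs i => pairs ++ g i) acc = acc ++ is.flatMap g := by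
  induction is with
  | nil => intro acc; simp
  | cons i is ih => intro acc; simp only [List.foldl_cons, List.flatMap_cons]; rw [ih]; simp

theorem pvFilterMap_flat (p : Char × (Int × Int) → Bool) (g : Int → List (Char × (Int × Int))) (is : List Int) :
    ((is.flatMap g).filter p).map Prod.snd = is.flatMap (fun i => ((g i).filter p).map Prod.snd) := by
  induction is with
  | nil => simp
  | cons i is ih => simp only [List.flatMap_cons, List.filter_append, List.map_append, ih]

-- per line: A's state machine for amphipod k equals B's filtered parsed pairs
theorem pvPerLine (k : Char) (i counter : Int) (cs : List Char) :
    pvAline k i cs counter false [] = ((pvLinePairs counter i (pvLstripHash cs)).filter (fun p => p.1 == k)).map Prod.snd := by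
  rw [pvAline_false, pvAline_true]
  unfold pvLinePairs
  rw [pvLinePairs_eq_emit (pvLstripHash cs) counter 0 i]
  norm_num

-- ===== VERDICT =====
theorem parse_coord_map_spec : Claim_equal_parse_coord_map := by
  intro xs _ _
  unfold Spec_parse_coord_map parse_coord_map parse_coord_map_alt
  simp only [List.foldl_cons, List.foldl_nil]
  rw [pvAfold_flat 'A' (fun i => ((PySem.List.pyGet? xs i).getD "").toList) (fun i => if i = 0 then 0 else 2),
      pvAfold_flat 'B' (fun i => ((PySem.List.pyGet? xs i).getD "").toList) (fun i => if i = 0 then 0 else 2),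
      pvAfold_flat 'C' (fun i => ((PySem.List.pyGet? xs i).getD "").toList) (fun i => if i = 0 then 0 else 2),
      pvAfold_flat 'D' (fun i => ((PySem.List.pyGet? xs i).getD "").toList) (fun i => if i = 0 then 0 else 2)]
  rw [pvBfold_flat (fun i => pvLinePairs (if i = 0 then 0 else 2) i (pvLstripHash ((PySem.List.pyGet? xs i).getD "").toList))]
  simp only [List.nil_append, pvFilterMap_flat, pvPerLine]
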